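-- pv_equiv track=rewrite | github.com/ancilcleetus/Foundations-of-Computer-Science | Intermediate-DSA/Day-008-Intermediate-DSA-Intro-to-Arrays/intermediate-dsa-intro-to-arrays-q01.py | getCount01
-- ===== SOURCE A (Python) =====
-- def getCount01(array):
--     """
--     TC = O(N)
--     SC = O(1)
--     """
--     array_size = len(array)
--
--     # Find largest element
--     largest = array[0]
--     for i in range(1, array_size):
--         if array[i] > largest:
--             largest = array[i]
--
--     # Find count of largest element
--     count_largest = 0
--     for i in range(array_size):
--         if array[i] == largest:
--             count_largest += 1
--
--     return array_size - count_largest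
-- ===== SOURCE B (Python) =====
-- def getCount01(array):
--     largest = array[0]
--     count = 0
--     for x in array:
--         if x > largest:
--             largest = x
--             count = 1
--         elif x == largest:
--             count += 1
--     return len(array) - count
-- ===== Notes on version B (the rewrite author's own statement) =====
-- stated objective: simpler
-- what changed: Replaces A's two sequential scans (one finding the maximum, one counting it) with a single pass that maintains the running maximum and its running count together, resetting the count when a new maximum appears; one traversal instead of two.
import Mathlib
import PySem

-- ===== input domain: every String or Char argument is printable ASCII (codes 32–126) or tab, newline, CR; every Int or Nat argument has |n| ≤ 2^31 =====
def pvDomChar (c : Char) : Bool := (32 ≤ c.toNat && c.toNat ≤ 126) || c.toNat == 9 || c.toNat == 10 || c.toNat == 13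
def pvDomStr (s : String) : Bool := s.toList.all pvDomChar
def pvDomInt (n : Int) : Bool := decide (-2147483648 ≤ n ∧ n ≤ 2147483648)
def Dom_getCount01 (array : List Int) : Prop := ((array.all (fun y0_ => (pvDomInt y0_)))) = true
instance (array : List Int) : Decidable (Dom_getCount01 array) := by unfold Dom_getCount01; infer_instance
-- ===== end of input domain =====

-- B merges A's two scans (find max, then count it) into one pass maintaining the max and its count; objective: simpler.


-- ===== PORT A =====
-- A's max step for the first loop (for i in range(1, n): if array[i] > largest: largest = array[i])
def mxF (l x : Int) : Int := if x > l then x else l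

def getCount01 (array : List Int) : Int :=
  let largest0 := (PySem.List.pyGet? array 0).getD 0   -- first element; Pre_ excludes the empty list, where Python raises IndexError
  let largest := (array.drop 1).foldl mxF largest0
  let count_largest := array.foldl (fun c x => if x = largest then c + 1 else c) (0 : Int)
  (array.length : Int) - count_largest

-- ===== PORT B =====
-- B's single-pass step: state = (largest, count)
def stepF (s : Int × Int) (x : Int) : Int × Int :=
  if x > s.1 then (x, 1) else if x = s.1 then (s.1, s.2 + 1) else s

def getCount01_alt (array : List Int) : Int :=
  let largest0 := (PySem.List.pyGet? array 0).getD 0   -- first element; raises IndexError on the empty list like A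
  let s := array.foldl stepF (largest0, 0)
  (array.length : Int) - s.2

-- ===== PRECONDITION & SPEC =====
-- Pre_ excludes only the empty list, on which both Pythons raise IndexError reading the first element.
def Pre_getCount01 (array : List Int) : Prop := array ≠ []
instance (array : List Int) : Decidable (Pre_getCount01 array) := by unfold Pre_getCount01; infer_instance
def pvWitness_getCount01 : List Int := ([3, 1, 3])
def Spec_getCount01 (array : List Int) (out : Int) : Prop := out = getCount01_alt array
instance (array : List Int) (out : Int) : Decidable (Spec_getCount01 array out) := by unfold Spec_getCount01; infer_instance

-- ===== CLAIM (what is proved, stated in full; the proofs are below) =====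
def Claim_equal_getCount01 : Prop := ∀ (array : List Int), Dom_getCount01 array → Pre_getCount01 array → Spec_getCount01 array (getCount01 array)

-- ===== LEMMAS AND PROOFS =====

theorem le_foldl_mx (l : List Int) (m : Int) : m ≤ l.foldl mxF m := by
  induction l generalizing m with
  | nil => simp
  | cons a t ih =>
    simp only [List.foldl_cons, mxF]
    split
    · exact le_trans (by omega) (ih a)
    · exact ih m

theorem count_foldl (l : List Int) (v : Int) (c : Int) :
    l.foldl (fun c x => if x = v then c + 1 else c) c = c + (l.count v : Int) := by
  induction l generalizing c with
  | nil => simp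
  | cons a t ih =>
    simp only [List.foldl_cons, List.count_cons]
    by_cases h : a = v
    · simp [h, ih]; omega
    · simp [h, ih]

theorem key (l : List Int) (m c : Int) :
    l.foldl stepF (m, c) =
      (l.foldl mxF m,
       if l.foldl mxF m = m then c + (l.count m : Int) else (l.count (l.foldl mxF m) : Int)) := by
  induction l generalizing m c with
  | nil => simp
  | cons a t ih =>
    simp only [List.foldl_cons, List.count_cons, stepF, mxF]
    by_cases h1 : a > m
    · simp only [if_pos h1]
      rw [ih]
      have hM : a ≤ t.foldl mxF a := le_foldl_mx t a
      have hMm : t.foldl mxF a ≠ m := by omega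
      simp only [if_neg hMm]
      by_cases h2 : t.foldl mxF a = a
      · have heq : (a == t.foldl mxF a) = true := by simp [h2]
        rw [if_pos h2]
        simp only [Prod.mk.injEq, heq, if_true]
        constructor
        · trivial
        · push_cast [h2]; omega
      · have hne : ¬ (a == t.foldl mxF a) = true := by
          simp only [beq_iff_eq]; exact fun h => h2 h.symm
        simp [h2, hne]
    · simp only [if_neg h1]
      by_cases h2 : a = m
      · simp only [if_pos h2]
        rw [ih]
        by_cases h3 : t.foldl mxF m = m
        · have heq : (a == m) = true := by simp [h2]
          simp only [h3, if_true, heq, Prod.mk.injEq, true_and]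
          push_cast
          omega
        · have hne : ¬ (a == t.foldl mxF m) = true := by
            simp only [beq_iff_eq, h2]
            exact fun h => h3 h.symm
          simp [h3, hne]
      · simp only [if_neg h2]
        rw [ih]
        have hM : m ≤ t.foldl mxF m := le_foldl_mx t m
        have ha : a < m := lt_of_le_of_ne (by omega) h2
        by_cases h3 : t.foldl mxF m = m
        · have hne : ¬ (a == m) = true := by simp [h2]
          simp [h3, hne]
        · have hne : ¬ (a == t.foldl mxF m) = true := by
            simp only [beq_iff_eq]; omega
          simp [h3, hne]

theorem getCount01_spec : Claim_equal_getCount01 := by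
  unfold Claim_equal_getCount01
  intro array _ hpre
  unfold Spec_getCount01 getCount01 getCount01_alt
  match array, hpre with
  | a :: t, _ =>
    simp only [PySem.List.pyGet?_zero_cons, Option.getD_some, List.drop_one, List.tail_cons]
    rw [key, count_foldl]
    have hget : mxF a a = a := by simp [mxF]
    simp only [List.foldl_cons, hget]
    by_cases h : t.foldl mxF a = a
    · simp [h]
    · simp [h]
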